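-- pv_equiv track=rewrite | github.com/a-kazakov/rockjudge | src/server/scoring_systems/cheerleading/implementation/common.py | assign_places
-- ===== SOURCE A (Python) =====
-- from typing import Any, Dict, Iterable, List, TypeVar, Optional
--
-- T = TypeVar("T")
--
-- def assign_places(totals: Iterable[T]) -> List[int]:
--     current_place = 1
--     prev_total: Optional[T] = None
--     result = []
--     for idx, next_total in enumerate(totals, start=1):
--         if prev_total != next_total:
--             current_place = idx
--             prev_total = next_total
--         result.append(current_place)
--     return result
-- ===== SOURCE B (Python) =====
-- from itertools import groupby
-- from typing import Iterable, List, TypeVar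
--
-- T = TypeVar("T")
--
-- def assign_places(totals: Iterable[T]) -> List[int]:
--     result: List[int] = []
--     place = 1
--     for _, group in groupby(totals):
--         n = len(list(group))
--         result.extend([place] * n)
--         place += n
--     return result
-- ===== Notes on version B (the rewrite author's own statement) =====
-- stated objective: alternative
-- what changed: Replaces the per-element prev_total comparison and index-tracked place counter with itertools.groupby run-length grouping: each run of equal totals emits its length copies of the cumulative place, which then advances by the run length.
import Mathlib
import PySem

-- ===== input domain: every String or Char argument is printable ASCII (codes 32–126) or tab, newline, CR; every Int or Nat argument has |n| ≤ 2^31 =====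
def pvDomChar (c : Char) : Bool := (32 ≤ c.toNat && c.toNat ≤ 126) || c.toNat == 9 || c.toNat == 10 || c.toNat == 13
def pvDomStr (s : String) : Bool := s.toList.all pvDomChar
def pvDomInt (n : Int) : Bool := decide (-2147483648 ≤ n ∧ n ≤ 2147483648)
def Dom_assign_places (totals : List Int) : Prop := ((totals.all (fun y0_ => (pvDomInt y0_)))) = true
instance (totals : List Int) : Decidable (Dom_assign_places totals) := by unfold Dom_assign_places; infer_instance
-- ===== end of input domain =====

-- B replaces A's per-element prev/index bookkeeping with run-length grouping (groupby): same cost, different decomposition.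


-- ===== PORT A =====
-- A's for-loop over enumerate(totals, start=1): state (idx, current_place, prev_total, result)
def assignPlacesLoop (xs : List Int) (idx cp : Int) (prev : Option Int) (res : List Int) : List Int :=
  match xs with
  | [] => res
  | x :: rest =>
    if prev ≠ some x then
      assignPlacesLoop rest (idx + 1) idx (some x) (res ++ [idx])
    else
      assignPlacesLoop rest (idx + 1) cp prev (res ++ [cp])

def assign_places (totals : List Int) : List Int :=
  assignPlacesLoop totals 1 1 none []

-- ===== PORT B =====
-- Source B's groupby loop: each run of equal values emits run-length copies of `place`, which advances by that length.
def assignPlacesGroups (xs : List Int) (place : Int) : List Int :=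
  match xs with
  | [] => []
  | x :: rest =>
    let n := (rest.takeWhile (· == x)).length + 1
    List.replicate n place ++ assignPlacesGroups (rest.dropWhile (· == x)) (place + n)
termination_by xs.length
decreasing_by
  simp only [List.length_cons]
  have := rest.length_dropWhile_le (· == x)
  omega

def assign_places_alt (totals : List Int) : List Int :=
  assignPlacesGroups totals 1

-- ===== PRECONDITION & SPEC =====
def Spec_assign_places (totals : List Int) (out : List Int) : Prop := out = assign_places_alt totals
instance (totals : List Int) (out : List Int) : Decidable (Spec_assign_places totals out) := by unfold Spec_assign_places; infer_instance

-- ===== CLAIM (what is proved, stated in full; the proofs are below) =====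
def Claim_equal_assign_places : Prop := ∀ (totals : List Int), Dom_assign_places totals → Spec_assign_places totals (assign_places totals)

-- ===== LEMMAS AND PROOFS =====

-- Invariant for an in-progress run: m ≥ 1 elements equal to x have been consumed, current place is cp,
-- so the loop index is cp + m.  The remaining takeWhile-run gets cp; afterwards B continues at cp + m + run length.
theorem assignPlacesLoop_run (rest : List Int) :
    ∀ (x cp : Int) (m : Nat) (res : List Int),
      assignPlacesLoop rest (cp + (m : Int)) cp (some x) res =
        res ++ List.replicate (rest.takeWhile (· == x)).length cp
            ++ assignPlacesGroups (rest.dropWhile (· == x))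
                 (cp + (m : Int) + ((rest.takeWhile (· == x)).length : Int)) := by
  induction rest with
  | nil => intro x cp m res; simp [assignPlacesLoop, assignPlacesGroups]
  | cons y rest ih =>
    intro x cp m res
    by_cases h : y = x
    · subst h
      simp only [assignPlacesLoop, List.takeWhile, List.dropWhile, BEq.rfl, ne_eq,
        not_true_eq_false, if_false]
      have : cp + (m : Int) + 1 = cp + ((m + 1 : Nat) : Int) := by push_cast; ring
      rw [this, ih y cp (m + 1) (res ++ [cp])]
      simp [List.replicate_succ]
      ring_nf
    · have hb : (y == x) = false := by simp [h]
      simp only [assignPlacesLoop, List.takeWhile, List.dropWhile, hb, ne_eq,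
        Option.some.injEq]
      rw [if_pos (by simpa using fun hxy => h hxy.symm)]
      have : cp + (m : Int) + 1 = (cp + (m : Int)) + ((1 : Nat) : Int) := by push_cast; ring
      rw [this, ih y (cp + (m : Int)) 1 (res ++ [cp + (m : Int)])]
      simp only [assignPlacesGroups]
      simp [List.replicate_succ]
      ring_nf

-- ===== VERDICT (by name: the statement is the Claim_ definition above) =====
theorem assign_places_spec : Claim_equal_assign_places := by
  intro totals _
  unfold Spec_assign_places assign_places assign_places_alt
  cases totals with
  | nil => simp [assignPlacesLoop, assignPlacesGroups]
  | cons x rest =>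
    simp only [assignPlacesLoop, ne_eq, reduceCtorEq, not_false_eq_true, if_pos, List.nil_append]
    have : (1 : Int) + 1 = 1 + ((1 : Nat) : Int) := by norm_num
    rw [this, assignPlacesLoop_run rest x 1 1 [1]]
    simp only [assignPlacesGroups]
    simp [List.replicate_succ]
    ring_nf
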